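-- pv_equiv track=rewrite | github.com/Idorobots/tree-sitter-org | src/org_parser/element/_list_recovery.py | _indent_width
-- ===== SOURCE A (Python) =====
-- def _indent_width(indent: str | None) -> int:
--     """Return indentation width for one optional indent string."""
--     if indent is None:
--         return 0
--     width = 0
--     for char in indent:
--         if char == " ":
--             width += 1
--             continue
--         if char == "\t":
--             # Org Mode (Emacs) treats a tab as 8 display columns, matching
--             # the default tab-width used when computing list indentation.
--             width += 8
--             continue
--         break
--     return width
-- ===== SOURCE B (Python) =====
-- def _indent_width(indent):
--     """Return indentation width for one optional indent string."""
--     if indent is None: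
--         return 0
--     prefix = indent[:len(indent) - len(indent.lstrip(" \t"))]
--     return prefix.count(" ") + 8 * prefix.count("\t")
-- ===== Notes on version B (the rewrite author's own statement) =====
-- stated objective: idiomatic
-- what changed: Replaces the fused scan-with-break accumulator loop by finding the space/tab prefix boundary via lstrip-and-slice, then summing two independent character counts over that prefix.
import Mathlib
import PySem

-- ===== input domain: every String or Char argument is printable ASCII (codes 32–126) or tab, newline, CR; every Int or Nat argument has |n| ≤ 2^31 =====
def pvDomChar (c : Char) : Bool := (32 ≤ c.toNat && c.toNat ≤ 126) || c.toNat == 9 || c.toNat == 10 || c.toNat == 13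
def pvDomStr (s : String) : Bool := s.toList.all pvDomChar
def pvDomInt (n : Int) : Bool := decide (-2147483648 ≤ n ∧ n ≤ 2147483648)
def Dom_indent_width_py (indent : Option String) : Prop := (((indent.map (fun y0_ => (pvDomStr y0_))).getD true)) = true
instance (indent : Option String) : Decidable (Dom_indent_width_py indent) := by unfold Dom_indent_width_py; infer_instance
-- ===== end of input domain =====

-- B replaces A's fused scan-with-break loop by an lstrip/slice boundary find plus two
-- independent character counts over the prefix (objective: idiomatic).

-- ===== PORT A =====
-- the for-loop with break, as structural recursion over the characters with accumulator `width`
def indentWidthLoop : List Char → Int → Int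
  | [], width => width
  | c :: rest, width =>
    if c = ' ' then indentWidthLoop rest (width + 1)
    else if c = '\t' then indentWidthLoop rest (width + 8)
    else width

def indent_width_py (indent : Option String) : Int :=
  match indent with
  | none => 0
  | some s => indentWidthLoop s.toList 0

-- ===== PORT B =====
def indent_width_py_alt (indent : Option String) : Int :=
  match indent with
  | none => 0
  | some s =>
    let cs := s.toList
    -- indent.lstrip(" \t"): drop leading chars from the set {' ', '\t'} (exact)
    let stripped := cs.dropWhile (fun c => c == ' ' || c == '\t')
    -- indent[:len(indent) - len(stripped)]
    let pfx := PySem.List.slice cs none (some ((cs.length : Int) - (stripped.length : Int)))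
    -- prefix.count(" ") + 8 * prefix.count("\t"): single-character substring count = element count (exact)
    (pfx.count ' ' : Int) + 8 * (pfx.count '\t' : Int)

-- ===== PRECONDITION & SPEC =====
def Spec_indent_width_py (indent : Option String) (out : Int) : Prop := out = indent_width_py_alt indent
instance (indent : Option String) (out : Int) : Decidable (Spec_indent_width_py indent out) := by unfold Spec_indent_width_py; infer_instance

-- ===== CLAIM (what is proved, stated in full; the proofs are below) =====
def Claim_equal_indent_width_py : Prop := ∀ (indent : Option String), Dom_indent_width_py indent → Spec_indent_width_py indent (indent_width_py indent)

-- ===== LEMMAS AND PROOFS =====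

lemma slice_to_takeWhile (cs : List Char) (p : Char → Bool) :
    PySem.List.slice cs none (some ((cs.length : Int) - ((cs.dropWhile p).length : Int)))
      = cs.takeWhile p := by
  have hlen : (cs.takeWhile p).length + (cs.dropWhile p).length = cs.length := by
    have h := congrArg List.length (List.takeWhile_append_dropWhile (p := p) (l := cs))
    rw [List.length_append] at h
    exact h
  have hcast : (cs.length : Int) - ((cs.dropWhile p).length : Int)
      = ((cs.takeWhile p).length : Int) := by omega
  rw [hcast, PySem.List.slice_to]
  · obtain ⟨t, ht⟩ := List.takeWhile_prefix (l := cs) p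
    calc cs.take (cs.takeWhile p).length
        = (cs.takeWhile p ++ t).take (cs.takeWhile p).length := by rw [ht]
      _ = cs.takeWhile p := by simp
  · positivity

lemma loop_eq_counts (cs : List Char) (w : Int) :
    indentWidthLoop cs w
      = w + ((cs.takeWhile (fun c => c == ' ' || c == '\t')).count ' ' : Int)
          + 8 * ((cs.takeWhile (fun c => c == ' ' || c == '\t')).count '\t' : Int) := by
  induction cs generalizing w with
  | nil => simp [indentWidthLoop]
  | cons c rest ih =>
    by_cases hs : c = ' '
    · subst hs
      simp [indentWidthLoop, ih]
      ring
    · by_cases ht : c = '\t'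
      · subst ht
        simp [indentWidthLoop, ih]
        ring
      · have : (c == ' ' || c == '\t') = false := by
          simp [hs, ht]
        simp [indentWidthLoop, hs, ht, this]

-- ===== VERDICT (by name: the statement is the Claim_ definition above) =====
theorem indent_width_py_spec : Claim_equal_indent_width_py := by
  intro indent _
  unfold Spec_indent_width_py indent_width_py indent_width_py_alt
  cases indent with
  | none => rfl
  | some s =>
    simp only [slice_to_takeWhile, loop_eq_counts]
    ring
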